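-- pv_equiv track=rewrite | github.com/ngsanthosh/100DaysofCode | Arrays/PartitionEqualSubset.py | getSplitpoint
-- ===== SOURCE A (Python) =====
-- def getSplitpoint(arr,n):
--     leftsum=0
--     rightsum=0
--     for i in range(n):
--         leftsum+=arr[i]
--
--     for i in range(n-1,-1,-1):
--         rightsum+=arr[i]
--         leftsum-=arr[i]
--         if leftsum==rightsum:
--             return i
--     return -1
-- ===== SOURCE B (Python) =====
-- def getSplitpoint(arr, n):
--     last = {}
--     prefix = 0
--     for i in range(n):
--         last[2 * prefix] = i
--         prefix += arr[i]
--     return last.get(prefix, -1)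
-- ===== Notes on version B (the rewrite author's own statement) =====
-- stated objective: alternative
-- what changed: Replaces A's two-pass sum-then-backward-compare scan by a hash map from doubled prefix sums to their (last) index built in one pass, so the answer is a single dictionary lookup of the total instead of a comparison loop.
import Mathlib
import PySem

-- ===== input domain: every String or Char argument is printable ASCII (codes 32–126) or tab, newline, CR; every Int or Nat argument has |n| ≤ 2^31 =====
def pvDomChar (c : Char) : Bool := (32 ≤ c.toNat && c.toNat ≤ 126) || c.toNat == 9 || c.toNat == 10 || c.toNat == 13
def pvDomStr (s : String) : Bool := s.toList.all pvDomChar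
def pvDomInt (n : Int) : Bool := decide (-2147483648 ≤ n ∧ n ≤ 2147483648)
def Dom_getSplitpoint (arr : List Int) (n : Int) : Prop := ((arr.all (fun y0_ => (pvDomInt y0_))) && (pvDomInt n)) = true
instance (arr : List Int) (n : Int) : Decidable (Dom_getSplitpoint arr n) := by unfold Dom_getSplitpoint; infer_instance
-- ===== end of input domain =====

-- B replaces A's backward comparison loop by a dict mapping each doubled prefix sum to
-- its last index, so the answer becomes one dictionary lookup (objective: alternative).

-- ===== PORT A =====
-- second loop of A: for i in range(n-1,-1,-1): rightsum+=arr[i]; leftsum-=arr[i]; if ==: return i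
def getSplitpointLoopA (arr : List Int) : List Int → Int → Int → Int
  | [], _, _ => -1
  | i :: rest, leftsum, rightsum =>
    let v := PySem.List.pyGetD arr i 0
    let rightsum' := rightsum + v
    let leftsum' := leftsum - v
    if leftsum' = rightsum' then i else getSplitpointLoopA arr rest leftsum' rightsum'

def getSplitpoint (arr : List Int) (n : Int) : Int :=
  let leftsum := (PySem.List.pyRange 0 n 1).foldl (fun s i => s + PySem.List.pyGetD arr i 0) 0
  getSplitpointLoopA arr (PySem.List.pyRange (n - 1) (-1) (-1)) leftsum 0

-- ===== PORT B =====
-- B's loop: last[2*prefix] = i; prefix += arr[i]  (state = the dict and the prefix sum)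
def getSplitpointLoopB (arr : List Int) : List Int → PySem.Dict Int Int → Int → PySem.Dict Int Int × Int
  | [], d, p => (d, p)
  | i :: rest, d, p =>
    getSplitpointLoopB arr rest (d.insert (2 * p) i) (p + PySem.List.pyGetD arr i 0)

def getSplitpoint_alt (arr : List Int) (n : Int) : Int :=
  let st := getSplitpointLoopB arr (PySem.List.pyRange 0 n 1) PySem.Dict.empty 0
  st.1.getD st.2 (-1)

-- ===== PRECONDITION & SPEC =====
-- A (and B) raise IndexError when n exceeds len(arr); Pre_ excludes exactly those inputs.
def Pre_getSplitpoint (arr : List Int) (n : Int) : Prop := n ≤ (arr.length : Int)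
instance (arr : List Int) (n : Int) : Decidable (Pre_getSplitpoint arr n) := by unfold Pre_getSplitpoint; infer_instance
def pvWitness_getSplitpoint : List Int × Int := ([1, 2, 3], 3)

def Spec_getSplitpoint (arr : List Int) (n : Int) (out : Int) : Prop := out = getSplitpoint_alt arr n
instance (arr : List Int) (n : Int) (out : Int) : Decidable (Spec_getSplitpoint arr n out) := by unfold Spec_getSplitpoint; infer_instance

-- ===== CLAIM (what is proved, stated in full; the proofs are below) =====
def Claim_equal_getSplitpoint : Prop := ∀ (arr : List Int) (n : Int), Dom_getSplitpoint arr n → Pre_getSplitpoint arr n → Spec_getSplitpoint arr n (getSplitpoint arr n)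

-- ===== LEMMAS AND PROOFS =====

-- sum of arr values over an index list
def pvSumg (arr : List Int) (l : List Int) : Int := (l.map (fun i => PySem.List.pyGetD arr i 0)).sum

-- the LAST index i in l whose doubled running prefix (started at p) equals K
def pvBackFind (arr : List Int) : List Int → Int → Int → Option Int
  | [], _, _ => none
  | i :: rest, p, K =>
    match pvBackFind arr rest (p + PySem.List.pyGetD arr i 0) K with
    | some j => some j
    | none => if 2 * p = K then some i else none

theorem pvFoldl_eq_sumg (arr : List Int) : ∀ (l : List Int) (a : Int),
    l.foldl (fun s i => s + PySem.List.pyGetD arr i 0) a = a + pvSumg arr l := by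
  intro l
  induction l with
  | nil => intro a; simp [pvSumg]
  | cons x xs ih =>
    intro a
    simp only [List.foldl_cons, pvSumg, List.map_cons, List.sum_cons]
    rw [ih]
    simp [pvSumg]; ring

theorem pvBackFind_append (arr : List Int) : ∀ (l : List Int) (i p K : Int),
    pvBackFind arr (l ++ [i]) p K =
      if 2 * (p + pvSumg arr l) = K then some i else pvBackFind arr l p K := by
  intro l
  induction l with
  | nil =>
    intro i p K
    simp [pvBackFind, pvSumg]
  | cons x xs ih =>
    intro i p K
    simp only [List.cons_append, pvBackFind]
    rw [ih]
    have hs : p + PySem.List.pyGetD arr x 0 + pvSumg arr xs = p + pvSumg arr (x :: xs) := by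
      simp [pvSumg]; ring
    rw [hs]
    by_cases h : 2 * (p + pvSumg arr (x :: xs)) = K
    · simp [h]
    · simp [h]

-- B's loop: final prefix is the starting prefix plus the summed values
theorem pvLoopB_snd (arr : List Int) : ∀ (l : List Int) (d : PySem.Dict Int Int) (p : Int),
    (getSplitpointLoopB arr l d p).2 = p + pvSumg arr l := by
  intro l
  induction l with
  | nil => intro d p; simp [getSplitpointLoopB, pvSumg]
  | cons x xs ih =>
    intro d p
    simp only [getSplitpointLoopB]
    rw [ih]
    simp [pvSumg]; ring

-- B's dict lookup is the last matching index, else the original dict's value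
theorem pvLoopB_getD (arr : List Int) : ∀ (l : List Int) (d : PySem.Dict Int Int) (p K dflt : Int),
    (getSplitpointLoopB arr l d p).1.getD K dflt =
      match pvBackFind arr l p K with
      | some i => i
      | none => d.getD K dflt := by
  intro l
  induction l with
  | nil => intro d p K dflt; simp [getSplitpointLoopB, pvBackFind]
  | cons x xs ih =>
    intro d p K dflt
    simp only [getSplitpointLoopB, pvBackFind]
    rw [ih]
    cases hbf : pvBackFind arr xs (p + PySem.List.pyGetD arr x 0) K with
    | some j => simp
    | none =>
      simp only []
      rw [PySem.Dict.getD_insert]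
      by_cases h : K = 2 * p
      · simp [h]
      · have h' : ¬ (2 * p = K) := fun hc => h hc.symm
        simp [h, h']

-- A's backward scan over l.reverse is the last forward match in l
theorem pvLoopA_eq_backFind (arr : List Int) : ∀ (m : List Int) (left rs : Int),
    getSplitpointLoopA arr m (left + pvSumg arr m.reverse) rs =
      match pvBackFind arr m.reverse left (left + pvSumg arr m.reverse + rs) with
      | some i => i
      | none => -1 := by
  intro m
  induction m with
  | nil => intro left rs; simp [getSplitpointLoopA, pvBackFind]
  | cons i m' ih =>
    intro left rs
    simp only [getSplitpointLoopA, List.reverse_cons]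
    rw [pvBackFind_append]
    have hsum : pvSumg arr (m'.reverse ++ [i]) =
        pvSumg arr m'.reverse + PySem.List.pyGetD arr i 0 := by
      simp [pvSumg]
    rw [hsum]
    set v := PySem.List.pyGetD arr i 0 with hv
    set S := pvSumg arr m'.reverse with hS
    have harg : left + (S + v) - v = left + S := by ring
    rw [harg]
    by_cases h : left + S = rs + v
    · rw [if_pos h, if_pos (by omega : 2 * (left + S) = left + (S + v) + rs)]
    · rw [if_neg h, if_neg (by omega : ¬ 2 * (left + S) = left + (S + v) + rs)]
      have := ih left (rs + v)
      rw [this]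
      have hK : left + S + (rs + v) = left + (S + v) + rs := by ring
      rw [hK]

-- ===== VERDICT (by name: the statement is the Claim_ definition above) =====
theorem getSplitpoint_spec : Claim_equal_getSplitpoint := by
  intro arr n _ _
  unfold Spec_getSplitpoint getSplitpoint getSplitpoint_alt
  rw [PySem.List.pyRange_neg_one_eq_reverse]
  have h0 : (-1 : Int) + 1 = 0 := by norm_num
  have h1 : n - 1 + 1 = n := by ring
  rw [h0, h1]
  rw [pvFoldl_eq_sumg]
  set l := PySem.List.pyRange 0 n 1 with hl
  have hA := pvLoopA_eq_backFind arr l.reverse 0 0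
  rw [List.reverse_reverse] at hA
  have hB := pvLoopB_getD arr l PySem.Dict.empty 0 (getSplitpointLoopB arr l PySem.Dict.empty 0).2 (-1)
  rw [pvLoopB_snd arr l PySem.Dict.empty 0] at hB
  simp only [zero_add, add_zero] at hA hB
  show getSplitpointLoopA arr l.reverse (0 + pvSumg arr l) 0 =
      (getSplitpointLoopB arr l PySem.Dict.empty 0).1.getD
        (getSplitpointLoopB arr l PySem.Dict.empty 0).2 (-1)
  rw [pvLoopB_snd arr l PySem.Dict.empty 0]
  simp only [zero_add]
  rw [hA, hB]
  cases pvBackFind arr l 0 (pvSumg arr l) <;> simp [PySem.Dict.getD_empty]
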